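-- pv_equiv track=rewrite | github.com/Kalliadickal/Academic-Progression-Guide | test/project.py | get_skew_data
-- ===== SOURCE A (Python) =====
-- def get_skew_data(smarks):
--     skdata=[]
--     for j in smarks:
--         a=[]
--         for k in range(7):
--             a.append(0)
--         for i in j:
--                 if i<40:
--                     if(i!=-1):
--                         a[0]=a[0]+1
--                 elif i<50:
--                     a[1]=a[1]+1
--                 elif i<60:
--                     a[2]=a[2]+1
--                 elif i<70:
--                     a[3]=a[3]+1
--                 elif i<80:
--                     a[4]=a[4]+1
--                 elif i<90:
--                     a[5]=a[5]+1
--                 elif i<100: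
--                     a[6]=a[6]+1
--         skdata.append(a)
--     return skdata
-- ===== SOURCE B (Python) =====
-- _BOUNDS = [40, 50, 60, 70, 80, 90, 100]
--
-- def get_skew_data(smarks):
--     result = []
--     for student in smarks:
--         cum = [sum(1 for m in student if m < t) for t in _BOUNDS]
--         row = [cum[0] - student.count(-1)] + [cum[k] - cum[k - 1] for k in range(1, 7)]
--         result.append(row)
--     return result
-- ===== Notes on version B (the rewrite author's own statement) =====
-- stated objective: alternative
-- what changed: Replaces per-mark bucket dispatch with staged counting: for each student it computes the 7 cumulative counts of marks below each boundary, then takes adjacent differences (subtracting the count of -1 from the first bucket), so no mark is ever routed to a bucket individually.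
import Mathlib
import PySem

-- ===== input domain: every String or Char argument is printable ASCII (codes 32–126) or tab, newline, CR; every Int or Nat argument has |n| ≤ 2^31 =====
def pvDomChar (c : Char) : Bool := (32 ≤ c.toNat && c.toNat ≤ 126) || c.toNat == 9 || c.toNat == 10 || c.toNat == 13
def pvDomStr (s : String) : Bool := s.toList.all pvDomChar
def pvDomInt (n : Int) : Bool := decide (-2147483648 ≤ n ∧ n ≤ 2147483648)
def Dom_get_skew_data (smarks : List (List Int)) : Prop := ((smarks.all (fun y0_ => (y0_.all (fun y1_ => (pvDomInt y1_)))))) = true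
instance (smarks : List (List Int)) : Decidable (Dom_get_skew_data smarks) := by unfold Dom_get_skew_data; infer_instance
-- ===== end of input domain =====

-- B replaces per-mark bucket dispatch with staged counting: cumulative counts below each boundary, then adjacent differences (alternative decomposition; same cost).


-- ===== PORT A =====
-- one mark of A's if-elif cascade (a[k] = a[k] + 1 on a 7-element list; List.set/getD are exact for these in-range literal indices)
def pvStepA (a : List Int) (i : Int) : List Int :=
  if i < 40 then
    (if i ≠ -1 then a.set 0 (a.getD 0 0 + 1) else a)
  else if i < 50 then a.set 1 (a.getD 1 0 + 1)
  else if i < 60 then a.set 2 (a.getD 2 0 + 1)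
  else if i < 70 then a.set 3 (a.getD 3 0 + 1)
  else if i < 80 then a.set 4 (a.getD 4 0 + 1)
  else if i < 90 then a.set 5 (a.getD 5 0 + 1)
  else if i < 100 then a.set 6 (a.getD 6 0 + 1)
  else a

def get_skew_data (smarks : List (List Int)) : List (List Int) :=
  smarks.foldl
    (fun skdata j =>
      skdata ++ [j.foldl pvStepA ((List.range 7).foldl (fun a _ => a ++ [(0 : Int)]) [])])
    []

-- ===== PORT B =====
def pvBounds : List Int := [40, 50, 60, 70, 80, 90, 100]

-- the generator-expression count 'sum(1 for m in student if m < t)' (a 0/1-sum IS List.countP)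
def pvCumBelow (student : List Int) (t : Int) : Int :=
  ((student.countP (fun m => decide (m < t))) : Int)

def pvRow (student : List Int) : List Int :=
  let cum := pvBounds.map (pvCumBelow student)
  [cum.getD 0 0 - (PySem.List.count student (-1) : Int)] ++
    (PySem.List.pyRange 1 7 1).map (fun k => cum.getD k.toNat 0 - cum.getD (k - 1).toNat 0)

def get_skew_data_alt (smarks : List (List Int)) : List (List Int) :=
  smarks.foldl (fun result student => result ++ [pvRow student]) []

-- ===== PRECONDITION & SPEC =====
def Spec_get_skew_data (smarks : List (List Int)) (out : List (List Int)) : Prop := out = get_skew_data_alt smarks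
instance (smarks : List (List Int)) (out : List (List Int)) : Decidable (Spec_get_skew_data smarks out) := by unfold Spec_get_skew_data; infer_instance

-- ===== CLAIM (what is proved, stated in full; the proofs are below) =====
def Claim_equal_get_skew_data : Prop := ∀ (smarks : List (List Int)), Dom_get_skew_data smarks → Spec_get_skew_data smarks (get_skew_data smarks)

-- ===== LEMMAS AND PROOFS =====

-- characterisation of A's per-student fold: each cell is its start value plus a count
theorem pvFoldA_char (j : List Int) (a0 a1 a2 a3 a4 a5 a6 : Int) :
    j.foldl pvStepA [a0, a1, a2, a3, a4, a5, a6] =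
      [a0 + pvCumBelow j 40 - (j.count (-1) : Int),
       a1 + pvCumBelow j 50 - pvCumBelow j 40,
       a2 + pvCumBelow j 60 - pvCumBelow j 50,
       a3 + pvCumBelow j 70 - pvCumBelow j 60,
       a4 + pvCumBelow j 80 - pvCumBelow j 70,
       a5 + pvCumBelow j 90 - pvCumBelow j 80,
       a6 + pvCumBelow j 100 - pvCumBelow j 90] := by
  induction j generalizing a0 a1 a2 a3 a4 a5 a6 with
  | nil => simp [pvCumBelow]
  | cons x xs ih =>
    simp only [List.foldl_cons, pvStepA]
    split_ifs with h1 h2 h3 h4 h5 h6 h7 h8 <;>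
      simp only [List.set_cons_succ, List.set_cons_zero, List.getD_cons_succ, List.getD_cons_zero,
        ih, pvCumBelow, List.countP_cons, List.count_cons, beq_iff_eq, decide_eq_true_eq,
        List.cons.injEq, and_true, Nat.cast_add, Nat.cast_ite, Nat.cast_one, Nat.cast_zero] <;>
      refine ⟨?_, ?_, ?_, ?_, ?_, ?_, ?_⟩ <;> split_ifs <;> omega

theorem pvFoldl_append_map {α β : Type} (f : α → β) (l : List α) (acc : List β) :
    l.foldl (fun s j => s ++ [f j]) acc = acc ++ l.map f := by
  induction l generalizing acc with
  | nil => simp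
  | cons x xs ih => simp [List.foldl, ih]

-- ===== VERDICT (by name: the statement is the Claim_ definition above) =====
theorem get_skew_data_spec : Claim_equal_get_skew_data := by
  intro smarks _
  show get_skew_data smarks = get_skew_data_alt smarks
  unfold get_skew_data get_skew_data_alt
  rw [pvFoldl_append_map]
  conv_rhs => rw [pvFoldl_append_map]
  simp only [List.nil_append]
  refine List.map_congr_left fun j _ => ?_
  have h7 : (List.range 7).foldl (fun a _ => a ++ [(0 : Int)]) [] = [0, 0, 0, 0, 0, 0, 0] := by
    decide
  rw [h7, pvFoldA_char]
  have hr : PySem.List.pyRange 1 7 1 = [1, 2, 3, 4, 5, 6] := by decide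
  simp [pvRow, hr, pvBounds, pvCumBelow]
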